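-- pv_equiv track=rewrite | github.com/prathammehta/interview-prep | StoresAndHouses.py | stores_and_houses
-- ===== SOURCE A (Python) =====
-- def stores_and_houses(houses, stores):
-- 	stores.sort()
-- 	sol = []
--
-- 	for house in houses:
-- 		l = 0
-- 		r = len(stores) - 1
-- 		ans = None
--
-- 		while True:
-- 			m = (l+r)//2
-- 			if stores[m] == house:
-- 				ans = stores[m]
-- 				break
-- 			elif r - l <= 1 and stores[r] != house and stores[l] != house:
-- 				break
-- 			elif stores[m] < house:
-- 				l = m
-- 			else:
-- 				r = m
--
-- 		if ans is None:
-- 			if abs(house - stores[l]) <= abs(house - stores[r]):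
-- 				ans = stores[l]
-- 			else:
-- 				ans = stores[r]
--
-- 		sol.append(ans)
--
-- 	return sol
-- ===== SOURCE B (Python) =====
-- def stores_and_houses(houses, stores):
-- 	stores.sort()
-- 	return [min(stores, key=lambda s: abs(s - house)) for house in houses]
-- ===== Notes on version B (the rewrite author's own statement) =====
-- stated objective: simpler
-- what changed: Replaced the hand-written per-house binary search (which infinite-loops whenever a house equals a uniquely-occurring maximum of two or more stores) by a single linear min over the sorted stores keyed on abs(store - house), whose first-minimum tie rule reproduces A's tie-to-smaller choice.
import Mathlib
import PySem

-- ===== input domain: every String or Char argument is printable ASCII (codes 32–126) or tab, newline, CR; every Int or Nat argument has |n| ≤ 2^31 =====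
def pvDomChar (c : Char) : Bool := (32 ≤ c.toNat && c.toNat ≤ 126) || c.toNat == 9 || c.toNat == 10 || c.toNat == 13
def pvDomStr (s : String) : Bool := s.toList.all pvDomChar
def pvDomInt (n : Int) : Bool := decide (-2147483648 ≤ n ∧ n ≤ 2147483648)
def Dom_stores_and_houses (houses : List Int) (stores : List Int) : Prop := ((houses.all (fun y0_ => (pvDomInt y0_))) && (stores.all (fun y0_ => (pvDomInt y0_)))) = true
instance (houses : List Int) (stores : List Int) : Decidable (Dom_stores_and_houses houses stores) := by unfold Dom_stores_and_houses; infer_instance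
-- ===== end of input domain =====

-- B replaces A's hand-written per-house binary search by one linear min with key |store - house|
-- (same return value on Pre_; A's `stores.sort()` mutates its argument in place, B sorts the same
-- argument in place too — the equivalence proved here is about the return value).


-- ===== PORT A =====
-- A's inner `while True` binary search; it does not terminate on every input (Pre_ excludes those),
-- so it carries a fuel counter large enough for every input Pre_ admits; `none` = IndexError or
-- fuel exhaustion, both outside Pre_.
def goA (s : List Int) (house : Int) (l r : Int) : Nat → Option Int
  | 0 => none
  | fuel+1 =>
    let m := PySem.Int.floordiv (l + r) 2
    match PySem.List.pyGet? s m, PySem.List.pyGet? s l, PySem.List.pyGet? s r with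
    | some sm, some sl, some sr =>
      if sm = house then some sm
      else if r - l ≤ 1 ∧ sr ≠ house ∧ sl ≠ house then
        some (if (house - sl).natAbs ≤ (house - sr).natAbs then sl else sr)
      else if sm < house then goA s house m r fuel
      else goA s house l m fuel
    | _, _, _ => none

def stores_and_houses (houses : List Int) (stores : List Int) : List Int :=
  let s := PySem.List.sorted stores (fun v => v) false
  houses.foldl (fun sol house =>
    match goA s house 0 ((s.length : Int) - 1) (s.length + 3) with
    | some ans => sol ++ [ans]
    | none => sol) []

-- ===== PORT B =====
def stores_and_houses_alt (houses : List Int) (stores : List Int) : List Int :=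
  let s := PySem.List.sorted stores (fun v => v) false
  -- min(stores, key=lambda s: abs(s - house)); `none` only when stores = [] (Python: ValueError), outside Pre_
  houses.map (fun house => (PySem.List.min? s (fun v => (v - house).natAbs)).getD 0)

-- ===== PRECONDITION & SPEC =====
-- Pre_ excludes exactly the inputs on which A does not return: empty stores with nonempty houses
-- (IndexError), and any house equal to the maximum of ≥ 2 stores when that maximum occurs only
-- once (A's binary search then loops forever).
def Pre_stores_and_houses (houses : List Int) (stores : List Int) : Prop :=
  (houses = [] ∨ stores ≠ []) ∧
  ∀ h ∈ houses, ¬ (2 ≤ stores.length ∧ PySem.List.max? stores (fun v => v) = some h ∧ stores.count h = 1)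
instance (houses : List Int) (stores : List Int) : Decidable (Pre_stores_and_houses houses stores) := by
  unfold Pre_stores_and_houses; infer_instance

def pvWitness_stores_and_houses : List Int × List Int := ([3, 10, -2], [1, 5, 5])

def Spec_stores_and_houses (houses : List Int) (stores : List Int) (out : List Int) : Prop := out = stores_and_houses_alt houses stores
instance (houses : List Int) (stores : List Int) (out : List Int) : Decidable (Spec_stores_and_houses houses stores out) := by unfold Spec_stores_and_houses; infer_instance

-- ===== CLAIM (what is proved, stated in full; the proofs are below) =====
def Claim_equal_stores_and_houses : Prop := ∀ (houses : List Int) (stores : List Int), Dom_stores_and_houses houses stores → Pre_stores_and_houses houses stores → Spec_stores_and_houses houses stores (stores_and_houses houses stores)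

-- ===== LEMMAS AND PROOFS =====

theorem pv_min?_eq_foldl {κ : Type} [LinearOrder κ] (xs : List Int) (key : Int → κ) :
    PySem.List.min? xs key = xs.foldl (fun acc x =>
      match acc with
      | none => some x
      | some m0 => if key x < key m0 then some x else some m0) none := by
  unfold PySem.List.min?
  congr 1
  funext acc x
  cases acc <;> rfl

theorem pv_min_aux {κ : Type} [LinearOrder κ] (key : Int → κ) (m : Int) :
    ∀ (t : List Int) (c : Int),
    (t.foldl (fun acc x =>
      match acc with
      | none => some x
      | some m0 => if key x < key m0 then some x else some m0) (some c)) = some m →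
    (m = c ∧ ∀ y ∈ t, ¬ key y < key c) ∨
    (∃ p q, t = p ++ m :: q ∧ key m < key c ∧ ∀ y ∈ p, key m < key y) := by
  intro t
  induction t with
  | nil => intro c hc; left; simp_all
  | cons y t ih =>
    intro c hc
    simp only [List.foldl_cons] at hc
    by_cases hy : key y < key c
    · simp only [hy, if_pos] at hc
      rcases ih y hc with ⟨rfl, hall⟩ | ⟨p, q, rfl, hlt, hall⟩
      · right; exact ⟨[], t, rfl, hy, by simp⟩
      · right
        exact ⟨y :: p, q, rfl, lt_trans hlt hy, by
          intro z hz
          rcases List.mem_cons.1 hz with rfl | hz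
          · exact hlt
          · exact hall z hz⟩
    · simp only [hy, if_false] at hc
      rcases ih c hc with ⟨rfl, hall⟩ | ⟨p, q, rfl, hlt, hall⟩
      · left
        refine ⟨rfl, ?_⟩
        intro z hz
        rcases List.mem_cons.1 hz with rfl | hz
        · exact hy
        · exact hall z hz
      · right
        refine ⟨y :: p, q, rfl, hlt, ?_⟩
        intro z hz
        rcases List.mem_cons.1 hz with rfl | hz
        · exact lt_of_lt_of_le hlt (le_of_not_gt hy)
        · exact hall z hz

-- Python's min keeps the FIRST strict minimizer: everything before it has strictly larger key.
theorem pv_min?_first {κ : Type} [LinearOrder κ] (xs : List Int) (key : Int → κ) (m : Int)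
    (hm : PySem.List.min? xs key = some m) :
    ∃ p q, xs = p ++ m :: q ∧ ∀ y ∈ p, key m < key y := by
  cases xs with
  | nil => simp [PySem.List.min?] at hm
  | cons x t =>
    have hm' : (t.foldl (fun acc x =>
      match acc with
      | none => some x
      | some m0 => if key x < key m0 then some x else some m0) (some x)) = some m := by
      rw [pv_min?_eq_foldl] at hm
      simpa only [List.foldl_cons] using hm
    rcases pv_min_aux key m t x hm' with ⟨rfl, _⟩ | ⟨p, q, rfl, hlt, hall⟩
    · exact ⟨[], t, rfl, by simp⟩
    · refine ⟨x :: p, q, rfl, ?_⟩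
      intro z hz
      rcases List.mem_cons.1 hz with rfl | hz
      · exact hlt
      · exact hall z hz

-- Characterization: on a sorted list, min by |·-h| returns the unique element that minimizes the
-- distance and, among equal distances, is the smallest.
theorem pv_min?_eq_of_sorted (s : List Int) (h a : Int)
    (hs : s.Pairwise (· ≤ ·)) (ha : a ∈ s)
    (h1 : ∀ y ∈ s, (a - h).natAbs ≤ (y - h).natAbs)
    (h2 : ∀ y ∈ s, (y - h).natAbs = (a - h).natAbs → a ≤ y) :
    PySem.List.min? s (fun v => (v - h).natAbs) = some a := by
  obtain ⟨m, hm⟩ : ∃ m, PySem.List.min? s (fun v => (v - h).natAbs) = some m := by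
    cases hmin : PySem.List.min? s (fun v => (v - h).natAbs) with
    | none =>
      exact absurd ((PySem.List.min?_eq_none_iff _ _).1 hmin) (by rintro rfl; simp at ha)
    | some m => exact ⟨m, rfl⟩
  have hmem := PySem.List.min?_mem hm
  have hmin := PySem.List.min?_isMin hm
  have hda : (m - h).natAbs = (a - h).natAbs :=
    le_antisymm (hmin a ha) (h1 m hmem)
  have ham : a ≤ m := h2 m hmem hda
  obtain ⟨p, q, rfl, hfirst⟩ := pv_min?_first s _ m hm
  rcases List.mem_append.1 ha with hap | haq
  · exact absurd hda.symm.le (by simpa using (hfirst a hap).not_ge)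
  · rcases List.mem_cons.1 haq with rfl | haq
    · exact hm
    · have hma : m ≤ a := by
        have := (List.pairwise_append.1 hs).2.1
        exact (List.pairwise_cons.1 this).1 a haq
      have : a = m := le_antisymm ham hma
      subst this; exact hm

theorem pv_mid (l r : Nat) :
    PySem.Int.floordiv ((l : Int) + (r : Int)) 2 = (((l + r) / 2 : Nat) : Int) := by
  rw [show ((l : Int) + (r : Int)) = (((l + r : Nat)) : Int) by push_cast; ring]
  exact_mod_cast PySem.Int.floordiv_natCast (l + r) 2

-- Main loop invariant: A's binary search returns B's nearest value.
theorem pv_goA_eq (s : List Int) (h : Int)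
    (hs : s.Pairwise (· ≤ ·))
    (hexc : ¬ (2 ≤ s.length ∧ s.getLast? = some h ∧ s.count h = 1)) :
    ∀ (fuel l r : Nat) (hlr : l ≤ r) (hr : r < s.length),
    (l = 0 ∨ s[l]'(by omega) < h) → (r = s.length - 1 ∨ h < s[r]) →
    r - l + 2 ≤ fuel →
    goA s h (l : Int) (r : Int) fuel = PySem.List.min? s (fun v => (v - h).natAbs) := by
  have hle : ∀ (i j : Nat) (hij : i ≤ j) (hj : j < s.length), s[i]'(by omega) ≤ s[j] := by
    intro i j hij hj
    rcases Nat.lt_or_eq_of_le hij with hlt | rfl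
    · exact List.pairwise_iff_getElem.mp hs i j (by omega) hj hlt
    · exact le_refl _
  intro fuel
  induction fuel with
  | zero => intro l r hlr hr hl hrI hf; omega
  | succ k ih =>
    intro l r hlr hr hl hrI hf
    have hllen : l < s.length := by omega
    have hmlen : (l + r) / 2 < s.length := by omega
    simp only [goA]
    rw [pv_mid l r, PySem.List.pyGet?_natCast, PySem.List.pyGet?_natCast,
      PySem.List.pyGet?_natCast, List.getElem?_eq_getElem hmlen,
      List.getElem?_eq_getElem hllen, List.getElem?_eq_getElem hr]
    dsimp only
    by_cases h1 : s[(l + r) / 2] = h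
    · rw [if_pos h1]
      rw [h1]
      refine (pv_min?_eq_of_sorted s h h hs ?_ ?_ ?_).symm
      · exact h1 ▸ List.getElem_mem hmlen
      · intro y hy; simp
      · intro y hy hty
        simp only [sub_self, Int.natAbs_zero] at hty
        omega
    · rw [if_neg h1]
      by_cases h2 : ((r : Int) - (l : Int) ≤ 1 ∧ s[r] ≠ h ∧ s[l] ≠ h)
      · rw [if_pos h2]
        obtain ⟨h2a, h2b, h2c⟩ := h2
        have hrl1 : r ≤ l + 1 := by omega
        have hlr_le : s[l] ≤ s[r] := hle l r hlr hr
        -- the returned value is B's nearest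
        by_cases hcmp : (h - s[l]).natAbs ≤ (h - s[r]).natAbs
        · rw [if_pos hcmp]
          refine (pv_min?_eq_of_sorted s h (s[l]) hs (List.getElem_mem hllen) ?_ ?_).symm
          · intro y hy
            obtain ⟨i, hi, rfl⟩ := List.mem_iff_getElem.mp hy
            by_cases hil : i ≤ l
            · have hisl : s[i] ≤ s[l] := hle i l hil hllen
              rcases hl with rfl | hlh
              · have hi0 : i = 0 := by omega
                subst hi0; omega
              · omega
            · have hri : s[r] ≤ s[i] := hle r i (by omega) hi
              rcases hrI with hre | hrh
              · have hir : i = r := by omega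
                subst hir; omega
              · omega
          · intro y hy hty
            obtain ⟨i, hi, rfl⟩ := List.mem_iff_getElem.mp hy
            by_cases hil : i ≤ l
            · have hisl : s[i] ≤ s[l] := hle i l hil hllen
              rcases hl with rfl | hlh
              · have hi0 : i = 0 := by omega
                subst hi0; omega
              · omega
            · have hri : s[r] ≤ s[i] := hle r i (by omega) hi
              rcases hrI with hre | hrh
              · have hir : i = r := by omega
                subst hir; omega
              · omega
        · rw [if_neg hcmp]
          refine (pv_min?_eq_of_sorted s h (s[r]) hs (List.getElem_mem hr) ?_ ?_).symm
          · intro y hy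
            obtain ⟨i, hi, rfl⟩ := List.mem_iff_getElem.mp hy
            by_cases hil : i ≤ l
            · have hisl : s[i] ≤ s[l] := hle i l hil hllen
              rcases hl with rfl | hlh
              · have hi0 : i = 0 := by omega
                subst hi0; omega
              · omega
            · have hri : s[r] ≤ s[i] := hle r i (by omega) hi
              rcases hrI with hre | hrh
              · have hir : i = r := by omega
                subst hir; omega
              · omega
          · intro y hy hty
            obtain ⟨i, hi, rfl⟩ := List.mem_iff_getElem.mp hy
            by_cases hil : i ≤ l
            · have hisl : s[i] ≤ s[l] := hle i l hil hllen
              rcases hl with rfl | hlh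
              · have hi0 : i = 0 := by omega
                subst hi0; omega
              · omega
            · have hri : s[r] ≤ s[i] := hle r i (by omega) hi
              rcases hrI with hre | hrh
              · have hir : i = r := by omega
                subst hir; omega
              · omega
      · rw [if_neg h2]
        by_cases h3 : s[(l + r) / 2] < h
        · rw [if_pos h3]
          by_cases hwide : l + 2 ≤ r
          · exact ih ((l + r) / 2) r (by omega) hr (Or.inr h3) hrI (by omega)
          · -- r ≤ l + 1: this is exactly the excluded stuck configuration; contradiction
            exfalso
            have hml : (l + r) / 2 = l := by omega
            simp only [hml] at h3 h1
            have hsr : s[r] = h := by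
              by_contra hc
              exact h2 ⟨by omega, hc, by omega⟩
            have hrne : r ≠ l := by
              intro he; subst he; exact h1 hsr
            have hr1 : r = l + 1 := by omega
            have hrlast : r = s.length - 1 := by
              rcases hrI with hre | hrh
              · exact hre
              · omega
            have hne : s ≠ [] := List.ne_nil_of_length_pos (by omega)
            refine hexc ⟨by omega, ?_, ?_⟩
            · rw [List.getLast?_eq_getElem?, List.getElem?_eq_getElem (by omega : s.length - 1 < s.length)]
              have : s.length - 1 = r := by omega
              simp only [this, hsr]
            · have hlast : s.getLast hne = h := by
                rw [List.getLast_eq_getElem]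
                have : s.length - 1 = r := by omega
                simp only [this, hsr]
              have hsplit : s.dropLast ++ [s.getLast hne] = s := List.dropLast_append_getLast hne
              have h0 : s.dropLast.count h = 0 := by
                rw [List.count_eq_zero]
                intro hmem
                obtain ⟨i, hi, hieq⟩ := List.mem_iff_getElem.mp hmem
                rw [List.getElem_dropLast] at hieq
                have hi' : i < s.length - 1 := by
                  simpa [List.length_dropLast] using hi
                have hisl : s[i] ≤ s[l] := hle i l (by omega) hllen
                omega
              calc s.count h = (s.dropLast ++ [s.getLast hne]).count h := by rw [hsplit]
                _ = 1 := by rw [List.count_append, h0, hlast]; simp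
        · rw [if_neg h3]
          have h3' : h < s[(l + r) / 2] := by
            rcases lt_or_eq_of_le (le_of_not_gt h3) with hlt | he
            · exact hlt
            · exact absurd he.symm h1
          by_cases hwide : l + 2 ≤ r
          · exact ih l ((l + r) / 2) (by omega) hmlen hl (Or.inr h3') (by omega)
          · have hml : (l + r) / 2 = l := by omega
            simp only [hml] at h1 h3'
            have hrne : r ≠ l := by
              intro he
              subst he
              exact h2 ⟨by omega, h1, h1⟩
            have hr1 : r = l + 1 := by omega
            rw [hml]
            exact ih l l (le_refl l) hllen hl (Or.inr h3') (by omega)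

-- ===== VERDICT (by name: the statement is the Claim_ definition above) =====
theorem stores_and_houses_spec : Claim_equal_stores_and_houses := by
  intro houses stores _ hpre
  obtain ⟨hp1, hp2⟩ := hpre
  show stores_and_houses houses stores = stores_and_houses_alt houses stores
  by_cases hst : stores = []
  · subst hst
    rcases hp1 with rfl | hne
    · rfl
    · exact absurd rfl hne
  · simp only [stores_and_houses, stores_and_houses_alt]
    set s := PySem.List.sorted stores (fun v => v) false with hsdef
    have hsne : s ≠ [] := by
      intro hc
      exact hst ((PySem.List.sorted_eq_nil_iff _ _ _).1 (hsdef ▸ hc))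
    have hspos : 1 ≤ s.length := List.length_pos_of_ne_nil hsne
    have hperm : s.Perm stores := PySem.List.sorted_perm stores (fun v => v) false
    have hlen : s.length = stores.length := hperm.length_eq
    have hs : s.Pairwise (· ≤ ·) := PySem.List.sorted_pairwise stores (fun v => v)
    have hle : ∀ (i j : Nat) (hij : i ≤ j) (hj : j < s.length), s[i]'(by omega) ≤ s[j] := by
      intro i j hij hj
      rcases Nat.lt_or_eq_of_le hij with hlt | rfl
      · exact List.pairwise_iff_getElem.mp hs i j (by omega) hj hlt
      · exact le_refl _
    have hexc : ∀ h ∈ houses, ¬ (2 ≤ s.length ∧ s.getLast? = some h ∧ s.count h = 1) := by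
      rintro h hh ⟨hln, hlast, hcnt⟩
      apply hp2 h hh
      have hhs : h ∈ s := List.mem_of_getLast? hlast
      have hmaxs : ∀ y ∈ s, y ≤ h := by
        intro y hy
        obtain ⟨i, hi, rfl⟩ := List.mem_iff_getElem.mp hy
        have hlast' : s[s.length - 1] = h := by
          rw [List.getLast?_eq_getElem?, List.getElem?_eq_getElem (by omega)] at hlast
          exact Option.some.inj hlast
        calc s[i] ≤ s[s.length - 1] := hle i (s.length - 1) (by omega) (by omega)
          _ = h := hlast'
      obtain ⟨mx, hmx⟩ : ∃ mx, PySem.List.max? stores (fun v => v) = some mx := by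
        cases hm : PySem.List.max? stores (fun v => v) with
        | none => exact absurd ((PySem.List.max?_eq_none_iff _ _).1 hm) hst
        | some mx => exact ⟨mx, rfl⟩
      have hmxh : mx = h := by
        have h1 : mx ≤ h := hmaxs mx (hperm.mem_iff.2 (PySem.List.max?_mem hmx))
        have h2 : h ≤ mx := PySem.List.max?_isMax hmx h (hperm.mem_iff.1 hhs)
        omega
      refine ⟨by omega, by rw [hmx, hmxh], ?_⟩
      rw [← hperm.count_eq]
      exact hcnt
    have hsome : ∀ h : Int, ∃ m, PySem.List.min? s (fun v => (v - h).natAbs) = some m := by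
      intro h
      cases hmin : PySem.List.min? s (fun v => (v - h).natAbs) with
      | none => exact absurd ((PySem.List.min?_eq_none_iff _ _).1 hmin) hsne
      | some m => exact ⟨m, rfl⟩
    have hval : ∀ h ∈ houses, goA s h 0 ((s.length : Int) - 1) (s.length + 3)
        = PySem.List.min? s (fun v => (v - h).natAbs) := by
      intro h hh
      have hcast : ((s.length : Int) - 1) = (((s.length - 1 : Nat)) : Int) := by omega
      rw [hcast]
      exact pv_goA_eq s h hs (hexc h hh) (s.length + 3) 0 (s.length - 1)
        (by omega) (by omega) (Or.inl rfl) (Or.inl rfl) (by omega)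
    suffices hgen : ∀ (hl : List Int) (acc : List Int),
        (∀ x ∈ hl, goA s x 0 ((s.length : Int) - 1) (s.length + 3)
          = PySem.List.min? s (fun v => (v - x).natAbs)) →
        hl.foldl (fun sol house =>
          match goA s house 0 ((s.length : Int) - 1) (s.length + 3) with
          | some ans => sol ++ [ans]
          | none => sol) acc
        = acc ++ hl.map (fun house => (PySem.List.min? s (fun v => (v - house).natAbs)).getD 0) by
      simpa using hgen houses [] hval
    intro hl
    induction hl with
    | nil => intro acc _; simp
    | cons x t iht =>
      intro acc hx
      simp only [List.foldl_cons, List.map_cons]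
      obtain ⟨m, hm⟩ := hsome x
      rw [hx x (List.mem_cons_self), hm]
      rw [iht (acc ++ [m]) (fun y hy => hx y (List.mem_cons_of_mem _ hy))]
      simp
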